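-- pv_equiv track=rewrite | github.com/jtap159/file_reassembly_tool | reassemble_task1.py | score_spaces
-- ===== SOURCE A (Python) =====
-- def score_spaces(document):
--     # the more positive the score the more spacing issues occurred
--     valid_spacing = [1, 4, 8, 12, 16]
--     count = 0
--     check = []
--     for character in document:
--         if character == " ":
--             count += 1
--         elif count > 0:
--             check.append(count)
--             count = 0
--     score = 0
--     for spacing in check:
--         if spacing not in valid_spacing:
--             min_score = min([abs(i - spacing) for i in valid_spacing])
--             score += min_score
--     return score
-- ===== SOURCE B (Python) =====
-- def score_spaces(document):
--     # run-length encode the document, then score the space runs (trailing spaces are never scored, as in A)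
--     valid_spacing = (1, 4, 8, 12, 16)
--     runs = []
--     for ch in document:
--         if runs and runs[-1][0] == ch:
--             runs[-1][1] += 1
--         else:
--             runs.append([ch, 1])
--     if runs and runs[-1][0] == " ":
--         runs.pop()
--     score = 0
--     for ch, n in runs:
--         if ch == " " and n not in valid_spacing:
--             score += min(abs(i - n) for i in valid_spacing)
--     return score
-- ===== Notes on version B (the rewrite author's own statement) =====
-- stated objective: alternative
-- what changed: Replaces A's counter-with-flush scan (pending space count flushed into a list on each non-space) by a run-length encoding of the whole document followed by scoring the space runs, dropping the trailing run when it is spaces.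
import Mathlib
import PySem

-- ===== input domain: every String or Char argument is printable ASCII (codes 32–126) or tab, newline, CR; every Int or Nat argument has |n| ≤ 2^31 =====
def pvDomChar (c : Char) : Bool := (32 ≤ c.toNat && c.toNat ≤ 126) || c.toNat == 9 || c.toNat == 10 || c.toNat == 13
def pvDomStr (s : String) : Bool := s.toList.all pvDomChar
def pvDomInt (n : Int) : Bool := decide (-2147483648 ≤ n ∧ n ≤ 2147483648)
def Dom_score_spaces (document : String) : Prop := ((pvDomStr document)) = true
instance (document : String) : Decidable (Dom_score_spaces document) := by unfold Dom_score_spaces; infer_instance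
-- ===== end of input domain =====

-- B replaces A's counter-with-flush scan by a run-length encoding of the document
-- followed by scoring the space runs (objective: alternative decomposition, same cost).

-- valid_spacing = [1, 4, 8, 12, 16] (same literal in both Pythons)
def pvValid : List Int := [1, 4, 8, 12, 16]

-- min([abs(i - spacing) for i in valid_spacing]) — the list is non-empty, so min never raises
def pvMinScore (spacing : Int) : Int :=
  (PySem.List.min? (pvValid.map (fun i => |i - spacing|)) id).getD 0

-- ===== PORT A =====
-- the body of A's first loop: count spaces, flush the pending count on a non-space
def pvStepA (s : Int × List Int) (character : Char) : Int × List Int :=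
  if character = ' ' then (s.1 + 1, s.2)
  else if s.1 > 0 then (0, s.2 ++ [s.1])
  else s

def score_spaces (document : String) : Int :=
  let st := document.toList.foldl pvStepA (0, [])
  st.2.foldl
    (fun score spacing =>
      if spacing ∉ pvValid then score + pvMinScore spacing else score) 0

-- ===== PORT B =====
-- the body of B's run-length loop; Python appends at the end / mutates runs[-1],
-- here the run list is kept reversed (head = last run) and reversed back below
def pvStepB (runs : List (Char × Int)) (ch : Char) : List (Char × Int) :=
  match runs with
  | (c, n) :: rest => if c = ch then (c, n + 1) :: rest else (ch, 1) :: (c, n) :: rest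
  | [] => [(ch, 1)]

-- `if runs and runs[-1][0] == " ": runs.pop()`
def pvPopTrailingSpaces (runs : List (Char × Int)) : List (Char × Int) :=
  match runs with
  | (c, n) :: rest => if c = ' ' then rest else (c, n) :: rest
  | [] => []

def score_spaces_alt (document : String) : Int :=
  let runs := (pvPopTrailingSpaces (document.toList.foldl pvStepB [])).reverse
  runs.foldl
    (fun score r =>
      if r.1 = ' ' ∧ r.2 ∉ pvValid then score + pvMinScore r.2 else score) 0

-- ===== PRECONDITION & SPEC =====
def Spec_score_spaces (document : String) (out : Int) : Prop := out = score_spaces_alt document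
instance (document : String) (out : Int) : Decidable (Spec_score_spaces document out) := by unfold Spec_score_spaces; infer_instance

-- ===== CLAIM (what is proved, stated in full; the proofs are below) =====
def Claim_equal_score_spaces : Prop := ∀ (document : String), Dom_score_spaces document → Spec_score_spaces document (score_spaces document)

-- ===== LEMMAS AND PROOFS =====

-- length of the trailing space run recorded in (reversed) run list `acc` = A's pending count
def pvHeadCount (acc : List (Char × Int)) : Int :=
  match acc with
  | (c, n) :: _ => if c = ' ' then n else 0
  | [] => 0

-- lengths of the non-trailing space runs, in document order = A's `check` list
def pvSpaceList (acc : List (Char × Int)) : List Int :=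
  ((pvPopTrailingSpaces acc).filterMap
    (fun r => if r.1 = ' ' then some r.2 else none)).reverse

theorem pvStepB_pos (acc : List (Char × Int)) (ch : Char)
    (h : ∀ r ∈ acc, 0 < r.2) : ∀ r ∈ pvStepB acc ch, 0 < r.2 := by
  intro r hr
  cases acc with
  | nil => simp [pvStepB] at hr; simp [hr]
  | cons a rest =>
    obtain ⟨c, n⟩ := a
    have hn : 0 < n := h (c, n) (by simp)
    by_cases hc : c = ch
    · simp [pvStepB, hc] at hr
      rcases hr with h1 | h2
      · subst h1; simp; omega
      · exact h r (by simp [h2])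
    · simp [pvStepB, hc] at hr
      rcases hr with h1 | h2 | h3
      · subst h1; simp
      · subst h2; simpa using hn
      · exact h r (by simp [h3])

theorem pvStep_compat (acc : List (Char × Int)) (ch : Char) (K : List Int)
    (h : ∀ r ∈ acc, 0 < r.2) :
    pvStepA (pvHeadCount acc, K ++ pvSpaceList acc) ch
      = (pvHeadCount (pvStepB acc ch), K ++ pvSpaceList (pvStepB acc ch)) := by
  cases acc with
  | nil =>
    by_cases hs : ch = ' ' <;>
      simp [pvStepA, pvStepB, pvHeadCount, pvSpaceList, pvPopTrailingSpaces, hs]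
  | cons a rest =>
    obtain ⟨c, n⟩ := a
    have hn : 0 < n := h (c, n) (by simp)
    by_cases hcs : c = ' '
    · subst hcs
      by_cases hs : ch = ' '
      · subst hs
        simp [pvStepA, pvStepB, pvHeadCount, pvSpaceList, pvPopTrailingSpaces]
      · have : ¬ (' ' = ch) := fun e => hs e.symm
        simp [pvStepA, pvStepB, pvHeadCount, pvSpaceList, pvPopTrailingSpaces, hs, this, hn]
    · by_cases hs : ch = ' '
      · subst hs
        have : ¬ (c = ' ') := hcs
        simp [pvStepA, pvStepB, pvHeadCount, pvSpaceList, pvPopTrailingSpaces, this]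
      · by_cases hce : c = ch
        · subst hce
          simp [pvStepA, pvStepB, pvHeadCount, pvSpaceList, pvPopTrailingSpaces, hs]
        · simp [pvStepA, pvStepB, pvHeadCount, pvSpaceList, pvPopTrailingSpaces, hs, hcs, hce]

theorem pvMain (cs : List Char) :
    ∀ (acc : List (Char × Int)) (K : List Int), (∀ r ∈ acc, 0 < r.2) →
    List.foldl pvStepA (pvHeadCount acc, K ++ pvSpaceList acc) cs
      = (pvHeadCount (List.foldl pvStepB acc cs),
         K ++ pvSpaceList (List.foldl pvStepB acc cs)) := by
  induction cs with
  | nil => intro acc K h; simp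
  | cons c cs ih =>
    intro acc K h
    simp only [List.foldl_cons, pvStep_compat acc c K h]
    exact ih (pvStepB acc c) K (pvStepB_pos acc c h)

theorem pvScoreFold (rs : List (Char × Int)) :
    ∀ (s : Int),
    rs.foldl (fun score r =>
        if r.1 = ' ' ∧ r.2 ∉ pvValid then score + pvMinScore r.2 else score) s
      = (rs.filterMap (fun r => if r.1 = ' ' then some r.2 else none)).foldl
          (fun score spacing =>
            if spacing ∉ pvValid then score + pvMinScore spacing else score) s := by
  induction rs with
  | nil => intro s; simp
  | cons r rs ih =>
    intro s
    obtain ⟨c, n⟩ := r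
    by_cases hc : c = ' '
    · by_cases hv : n ∈ pvValid <;> simp [hc, hv, ih]
    · simp [hc, ih]

-- ===== VERDICT (by name: the statement is the Claim_ definition above) =====
theorem score_spaces_spec : Claim_equal_score_spaces := by
  intro document _
  unfold Spec_score_spaces score_spaces score_spaces_alt
  have hmain := pvMain document.toList [] [] (by simp)
  simp only [pvHeadCount, pvSpaceList, pvPopTrailingSpaces, List.filterMap_nil,
    List.reverse_nil, List.nil_append] at hmain
  rw [hmain]
  rw [pvScoreFold]
  rw [← List.filterMap_reverse]
  rfl
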